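-- pv_equiv track=rewrite | github.com/yusuke-matsunaga/ym-logic | c++-srcs/rwt/utils/npn4.py | xform
-- ===== SOURCE A (Python) =====
-- def xform(tv, oinv, iinv_list, iperm_list):
--     if oinv:
--         tv = ~tv & 0xFFFF
--     if iinv_list[0]:
--         tv0 = tv & 0x5555
--         tv1 = tv & 0xAAAA
--         tv = (tv1 >> 1) | (tv0 << 1)
--     if iinv_list[1]:
--         tv0 = tv & 0x3333
--         tv1 = tv & 0xCCCC
--         tv = (tv1 >> 2) | (tv0 << 2)
--     if iinv_list[2]:
--         tv0 = tv & 0x0F0F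
--         tv1 = tv & 0xF0F0
--         tv = (tv1 >> 4) | (tv0 << 4)
--     if iinv_list[3]:
--         tv0 = tv & 0x00FF
--         tv1 = tv & 0xFF00
--         tv = (tv1 >> 8) | (tv0 << 8)
--     xtv = 0
--     for b in range(16):
--         if tv & (1 << b):
--             new_b = 0
--             for i in range(4):
--                 if b & (1 << i):
--                     new_b |= (1 << iperm_list[i])
--             xtv |= (1 << new_b)
--     return xtv
-- ===== SOURCE B (Python) =====
-- def xform(tv, oinv, iinv_list, iperm_list):
--     if oinv:
--         tv = ~tv & 0xFFFF
--     inv_mask = 0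
--     for i in range(4):
--         if iinv_list[i]:
--             inv_mask |= 1 << i
--     xtv = 0
--     for b in range(16):
--         if tv & (1 << (b ^ inv_mask)):
--             new_b = 0
--             for i in range(4):
--                 if b & (1 << i):
--                     new_b |= 1 << iperm_list[i]
--             xtv |= 1 << new_b
--     return xtv
-- ===== Notes on version B (the rewrite author's own statement) =====
-- stated objective: simpler
-- what changed: The four conditional bit-parallel mask-and-shift swap blocks are replaced by computing a single 4-bit inversion mask and reading each source bit of the truth table at the XOR-ed index b ^ inv_mask inside the one permutation loop.
-- outside the precondition, e.g. on xform(1, False, [False, False, False, False], [-1, 0, 1, 2]): A returns 1, B returns 1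
import Mathlib
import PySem

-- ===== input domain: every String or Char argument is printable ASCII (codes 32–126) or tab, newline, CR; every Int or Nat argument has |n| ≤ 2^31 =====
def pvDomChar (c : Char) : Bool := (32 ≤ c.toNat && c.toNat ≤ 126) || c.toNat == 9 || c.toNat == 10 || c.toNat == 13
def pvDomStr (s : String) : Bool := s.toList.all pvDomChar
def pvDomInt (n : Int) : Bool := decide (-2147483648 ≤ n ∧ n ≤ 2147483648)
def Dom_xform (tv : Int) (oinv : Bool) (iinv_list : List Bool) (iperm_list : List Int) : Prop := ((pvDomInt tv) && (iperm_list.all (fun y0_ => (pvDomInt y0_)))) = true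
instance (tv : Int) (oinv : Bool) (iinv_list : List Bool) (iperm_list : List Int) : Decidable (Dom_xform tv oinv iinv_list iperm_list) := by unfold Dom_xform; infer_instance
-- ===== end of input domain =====

-- B replaces A's four conditional mask-and-shift bit-swap blocks by one computed 4-bit inversion
-- mask and an XOR-ed source-bit index inside the single permutation loop (objective: simpler).

-- Python's `a << k` / `a >> k` for a nonnegative shift amount k (the only case either program
-- reaches under Pre_xform): exactly Lean's `<<<` / `>>>` on Int with a Nat amount.
def pyShl (a : Int) (k : Nat) : Int := a <<< k
def pyShr (a : Int) (k : Nat) : Int := a >>> k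

-- ===== PORT A =====
-- Port notes: list indexing is the total pyGetD (exact under Pre_xform: both lists have ≥ 4
-- elements), and Python's `1 << e` is `pyShl 1 e.toNat` (exact for the nonnegative shift
-- amounts guaranteed by the range loops and by Pre_xform for the consulted iperm entries).
def xform (tv : Int) (oinv : Bool) (iinv_list : List Bool) (iperm_list : List Int) : Int :=
  let tv := if oinv then PySem.Int.band (Int.not tv) 65535 else tv
  let tv := if PySem.List.pyGetD iinv_list 0 false then
      let tv0 := PySem.Int.band tv 21845
      let tv1 := PySem.Int.band tv 43690
      PySem.Int.bor (pyShr tv1 1) (pyShl tv0 1)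
    else tv
  let tv := if PySem.List.pyGetD iinv_list 1 false then
      let tv0 := PySem.Int.band tv 13107
      let tv1 := PySem.Int.band tv 52428
      PySem.Int.bor (pyShr tv1 2) (pyShl tv0 2)
    else tv
  let tv := if PySem.List.pyGetD iinv_list 2 false then
      let tv0 := PySem.Int.band tv 3855
      let tv1 := PySem.Int.band tv 61680
      PySem.Int.bor (pyShr tv1 4) (pyShl tv0 4)
    else tv
  let tv := if PySem.List.pyGetD iinv_list 3 false then
      let tv0 := PySem.Int.band tv 255
      let tv1 := PySem.Int.band tv 65280
      PySem.Int.bor (pyShr tv1 8) (pyShl tv0 8)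
    else tv
  (PySem.List.pyRange 0 16 1).foldl (fun xtv b =>
    if PySem.Int.band tv (pyShl 1 b.toNat) ≠ 0 then
      let new_b := (PySem.List.pyRange 0 4 1).foldl (fun new_b i =>
        if PySem.Int.band b (pyShl 1 i.toNat) ≠ 0 then
          PySem.Int.bor new_b (pyShl 1 (PySem.List.pyGetD iperm_list i 0).toNat)
        else new_b) 0
      PySem.Int.bor xtv (pyShl 1 new_b.toNat)
    else xtv) 0

-- ===== PORT B =====
def xform_alt (tv : Int) (oinv : Bool) (iinv_list : List Bool) (iperm_list : List Int) : Int :=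
  let tv := if oinv then PySem.Int.band (Int.not tv) 65535 else tv
  let inv_mask := (PySem.List.pyRange 0 4 1).foldl (fun inv_mask i =>
      if PySem.List.pyGetD iinv_list i false then PySem.Int.bor inv_mask (pyShl 1 i.toNat)
      else inv_mask) 0
  (PySem.List.pyRange 0 16 1).foldl (fun xtv b =>
    if PySem.Int.band tv (pyShl 1 (PySem.Int.bxor b inv_mask).toNat) ≠ 0 then
      let new_b := (PySem.List.pyRange 0 4 1).foldl (fun new_b i =>
        if PySem.Int.band b (pyShl 1 i.toNat) ≠ 0 then
          PySem.Int.bor new_b (pyShl 1 (PySem.List.pyGetD iperm_list i 0).toNat)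
        else new_b) 0
      PySem.Int.bor xtv (pyShl 1 new_b.toNat)
    else xtv) 0

-- ===== PRECONDITION & SPEC =====
-- Pre_xform: the four inversion flags and four permutation entries must exist (else Python raises
-- IndexError) and the first four iperm entries must be nonnegative (a negative entry makes
-- `1 << iperm_list[i]` raise ValueError whenever that shift is evaluated; see claim.json cites
-- for the rare excluded inputs on which the negative entry is never consulted and A still returns).
def Pre_xform (tv : Int) (oinv : Bool) (iinv_list : List Bool) (iperm_list : List Int) : Prop :=
  4 ≤ iinv_list.length ∧ 4 ≤ iperm_list.length ∧ ∀ p ∈ iperm_list.take 4, 0 ≤ p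
instance (tv : Int) (oinv : Bool) (iinv_list : List Bool) (iperm_list : List Int) : Decidable (Pre_xform tv oinv iinv_list iperm_list) := by unfold Pre_xform; infer_instance
def pvWitness_xform : Int × Bool × List Bool × List Int := (6, true, [true, false, false, true], [1, 0, 3, 2])

def Spec_xform (tv : Int) (oinv : Bool) (iinv_list : List Bool) (iperm_list : List Int) (out : Int) : Prop := out = xform_alt tv oinv iinv_list iperm_list
instance (tv : Int) (oinv : Bool) (iinv_list : List Bool) (iperm_list : List Int) (out : Int) : Decidable (Spec_xform tv oinv iinv_list iperm_list out) := by unfold Spec_xform; infer_instance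

-- ===== CLAIM (what is proved, stated in full; the proofs are below) =====
def Claim_equal_xform : Prop := ∀ (tv : Int) (oinv : Bool) (iinv_list : List Bool) (iperm_list : List Int), Dom_xform tv oinv iinv_list iperm_list → Pre_xform tv oinv iinv_list iperm_list → Spec_xform tv oinv iinv_list iperm_list (xform tv oinv iinv_list iperm_list)

-- ===== LEMMAS AND PROOFS =====

-- Nat bits of a Python-style masked Int: `bmask t m` is the Nat whose bits are `t & m` for m ≥ 0.
def bmask (t : Int) (m : Nat) : Nat :=
  match t with
  | .ofNat n => n &&& m
  | .negSucc n => Nat.ldiff m n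

lemma sub_and_eq_ldiff (a : Nat) : ∀ b : Nat, a - (a &&& b) = Nat.ldiff a b := by
  induction a using Nat.binaryRec with
  | zero => intro b; apply Nat.eq_of_testBit_eq; intro i; simp [Nat.testBit_ldiff]
  | bit c n ih =>
    intro b
    rw [← Nat.bit_bodd_div2 b, Nat.land_bit, Nat.ldiff_bit, Nat.bit_val, Nat.bit_val, Nat.bit_val]
    have h1 : n &&& b.div2 ≤ n := Nat.and_le_left
    have h2 := ih b.div2
    cases c <;> cases hb : b.bodd <;> simp <;> omega

lemma pyShr_natCast (n s : Nat) : pyShr ((n : Nat) : Int) s = ((n >>> s : Nat) : Int) := rfl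
lemma pyShl_natCast (n s : Nat) : pyShl ((n : Nat) : Int) s = ((n <<< s : Nat) : Int) := rfl
lemma tb_cast (n k : Nat) : ((n : Nat) : Int).testBit k = n.testBit k := rfl

lemma band_mask_eq (t : Int) (m : Nat) : PySem.Int.band t ((m : Nat) : Int) = ((bmask t m : Nat) : Int) := by
  cases t with
  | ofNat n =>
    show PySem.Int.band (Int.ofNat n) _ = _
    simp [PySem.Int.band, bmask]
  | negSucc n =>
    show PySem.Int.band (Int.negSucc n) _ = _
    simp [PySem.Int.band, bmask]
    exact sub_and_eq_ldiff m n

lemma testBit_bmask (t : Int) (m k : Nat) :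
    (bmask t m).testBit k = (t.testBit k && m.testBit k) := by
  cases t with
  | ofNat n => simp [bmask, Int.testBit]
  | negSucc n => simp [bmask, Nat.testBit_ldiff, Int.testBit, Bool.and_comm]

-- Python's truthiness test `tv & (1 << k)` reads exactly bit k of tv (two's complement).
lemma tbL1 (x : Int) (k : Nat) : PySem.Int.band x (pyShl 1 k) ≠ 0 ↔ x.testBit k = true := by
  rw [show ((1 : Int)) = ((1 : Nat) : Int) from rfl, pyShl_natCast, Nat.one_shiftLeft, band_mask_eq]
  rw [Ne, Int.natCast_eq_zero]
  cases x with
  | ofNat n =>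
    show ¬ (n &&& 2 ^ k) = 0 ↔ n.testBit k = true
    rw [Nat.and_two_pow]
    cases hn : n.testBit k <;> simp
  | negSucc n =>
    show ¬ (Nat.ldiff (2 ^ k) n) = 0 ↔ (!n.testBit k) = true
    rw [← sub_and_eq_ldiff, Nat.two_pow_and]
    have := Nat.two_pow_pos k
    cases hn : n.testBit k <;> simp

lemma xlt16 {a m : Nat} (ha : a < 16) (hm : m < 16) : a ^^^ m < 16 :=
  Nat.xor_lt_two_pow (n := 4) ha hm

lemma st1 (t : Int) (k : Nat) (hk : k < 16) :
    (PySem.Int.bor (pyShr (PySem.Int.band t 43690) 1) (pyShl (PySem.Int.band t 21845) 1)).testBit k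
      = t.testBit (k ^^^ 1) := by
  rw [show (43690:Int) = ((43690:Nat):Int) from rfl, show (21845:Int) = ((21845:Nat):Int) from rfl,
     band_mask_eq, band_mask_eq, pyShr_natCast, pyShl_natCast, PySem.Int.bor_natCast, tb_cast]
  simp only [Nat.testBit_lor, Nat.testBit_shiftRight, Nat.testBit_shiftLeft, testBit_bmask]
  interval_cases k <;> simp [Nat.testBit, Nat.shiftRight_eq_div_pow]

lemma st2 (t : Int) (k : Nat) (hk : k < 16) :
    (PySem.Int.bor (pyShr (PySem.Int.band t 52428) 2) (pyShl (PySem.Int.band t 13107) 2)).testBit k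
      = t.testBit (k ^^^ 2) := by
  rw [show (52428:Int) = ((52428:Nat):Int) from rfl, show (13107:Int) = ((13107:Nat):Int) from rfl,
     band_mask_eq, band_mask_eq, pyShr_natCast, pyShl_natCast, PySem.Int.bor_natCast, tb_cast]
  simp only [Nat.testBit_lor, Nat.testBit_shiftRight, Nat.testBit_shiftLeft, testBit_bmask]
  interval_cases k <;> simp [Nat.testBit, Nat.shiftRight_eq_div_pow]

lemma st3 (t : Int) (k : Nat) (hk : k < 16) :
    (PySem.Int.bor (pyShr (PySem.Int.band t 61680) 4) (pyShl (PySem.Int.band t 3855) 4)).testBit k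
      = t.testBit (k ^^^ 4) := by
  rw [show (61680:Int) = ((61680:Nat):Int) from rfl, show (3855:Int) = ((3855:Nat):Int) from rfl,
     band_mask_eq, band_mask_eq, pyShr_natCast, pyShl_natCast, PySem.Int.bor_natCast, tb_cast]
  simp only [Nat.testBit_lor, Nat.testBit_shiftRight, Nat.testBit_shiftLeft, testBit_bmask]
  interval_cases k <;> simp [Nat.testBit, Nat.shiftRight_eq_div_pow]

lemma st4 (t : Int) (k : Nat) (hk : k < 16) :
    (PySem.Int.bor (pyShr (PySem.Int.band t 65280) 8) (pyShl (PySem.Int.band t 255) 8)).testBit k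
      = t.testBit (k ^^^ 8) := by
  rw [show (65280:Int) = ((65280:Nat):Int) from rfl, show (255:Int) = ((255:Nat):Int) from rfl,
     band_mask_eq, band_mask_eq, pyShr_natCast, pyShl_natCast, PySem.Int.bor_natCast, tb_cast]
  simp only [Nat.testBit_lor, Nat.testBit_shiftRight, Nat.testBit_shiftLeft, testBit_bmask]
  interval_cases k <;> simp [Nat.testBit, Nat.shiftRight_eq_div_pow]

lemma guard_eq (t : Int) (bn m : Nat) :
    (PySem.Int.band t (pyShl 1 (PySem.Int.bxor (bn : Int) ((m : Nat) : Int)).toNat) ≠ 0)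
      ↔ t.testBit (bn ^^^ m) = true := by
  rw [PySem.Int.bxor_natCast, Int.toNat_natCast, tbL1]

lemma mask_fold (iinv_list : List Bool) :
    (PySem.List.pyRange 0 4 1).foldl (fun inv_mask i =>
      if PySem.List.pyGetD iinv_list i false then PySem.Int.bor inv_mask (pyShl 1 i.toNat)
      else inv_mask) 0
    = ((((if PySem.List.pyGetD iinv_list 0 false then 1 else 0)
        + (if PySem.List.pyGetD iinv_list 1 false then 2 else 0)
        + (if PySem.List.pyGetD iinv_list 2 false then 4 else 0)
        + (if PySem.List.pyGetD iinv_list 3 false then 8 else 0) : Nat) : Nat) : Int) := by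
  cases h0 : PySem.List.pyGetD iinv_list 0 false <;>
  cases h1 : PySem.List.pyGetD iinv_list 1 false <;>
  cases h2 : PySem.List.pyGetD iinv_list 2 false <;>
  cases h3 : PySem.List.pyGetD iinv_list 3 false <;>
    simp only [show PySem.List.pyRange 0 4 1 = [0, 1, 2, 3] from by decide, List.foldl,
      h0, h1, h2, h3] <;> decide

lemma core (t : Int) (iinv_list : List Bool) (iperm_list : List Int) :
    xform t false iinv_list iperm_list = xform_alt t false iinv_list iperm_list := by
  simp only [xform, xform_alt, Bool.false_eq_true, if_false]
  rw [mask_fold]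
  cases h0 : PySem.List.pyGetD iinv_list 0 false <;>
  cases h1 : PySem.List.pyGetD iinv_list 1 false <;>
  cases h2 : PySem.List.pyGetD iinv_list 2 false <;>
  cases h3 : PySem.List.pyGetD iinv_list 3 false <;>
    simp only [Bool.false_eq_true, if_false, if_true]
  · -- flags 0000, inversion mask 0
    refine PySem.List.foldl_congr_mem _ _ _ _ ?_
    intro acc b hb
    rw [PySem.List.mem_pyRange_one] at hb
    obtain ⟨bn, rfl⟩ : ∃ bn : Nat, b = (bn : Int) := ⟨b.toNat, (Int.toNat_of_nonneg hb.1).symm⟩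
    have hbn : bn < 16 := by exact_mod_cast hb.2
    refine if_congr ?_ rfl rfl
    rw [guard_eq]
    simp only [Int.toNat_natCast]
    rw [tbL1]
    try simp
  · -- flags 0001, inversion mask 8
    refine PySem.List.foldl_congr_mem _ _ _ _ ?_
    intro acc b hb
    rw [PySem.List.mem_pyRange_one] at hb
    obtain ⟨bn, rfl⟩ : ∃ bn : Nat, b = (bn : Int) := ⟨b.toNat, (Int.toNat_of_nonneg hb.1).symm⟩
    have hbn : bn < 16 := by exact_mod_cast hb.2
    refine if_congr ?_ rfl rfl
    rw [guard_eq]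
    simp only [Int.toNat_natCast]
    rw [tbL1]
    rw [st4 _ _ hbn]
    try simp [Nat.xor_assoc]
  · -- flags 0010, inversion mask 4
    refine PySem.List.foldl_congr_mem _ _ _ _ ?_
    intro acc b hb
    rw [PySem.List.mem_pyRange_one] at hb
    obtain ⟨bn, rfl⟩ : ∃ bn : Nat, b = (bn : Int) := ⟨b.toNat, (Int.toNat_of_nonneg hb.1).symm⟩
    have hbn : bn < 16 := by exact_mod_cast hb.2
    refine if_congr ?_ rfl rfl
    rw [guard_eq]
    simp only [Int.toNat_natCast]
    rw [tbL1]
    rw [st3 _ _ hbn]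
    try simp [Nat.xor_assoc]
  · -- flags 0011, inversion mask 12
    refine PySem.List.foldl_congr_mem _ _ _ _ ?_
    intro acc b hb
    rw [PySem.List.mem_pyRange_one] at hb
    obtain ⟨bn, rfl⟩ : ∃ bn : Nat, b = (bn : Int) := ⟨b.toNat, (Int.toNat_of_nonneg hb.1).symm⟩
    have hbn : bn < 16 := by exact_mod_cast hb.2
    refine if_congr ?_ rfl rfl
    rw [guard_eq]
    simp only [Int.toNat_natCast]
    rw [tbL1]
    rw [st4 _ _ hbn]
    have hx0 : bn ^^^ 8 < 16 := xlt16 hbn (by norm_num)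
    rw [st3 _ _ hx0]
    try simp [Nat.xor_assoc]
  · -- flags 0100, inversion mask 2
    refine PySem.List.foldl_congr_mem _ _ _ _ ?_
    intro acc b hb
    rw [PySem.List.mem_pyRange_one] at hb
    obtain ⟨bn, rfl⟩ : ∃ bn : Nat, b = (bn : Int) := ⟨b.toNat, (Int.toNat_of_nonneg hb.1).symm⟩
    have hbn : bn < 16 := by exact_mod_cast hb.2
    refine if_congr ?_ rfl rfl
    rw [guard_eq]
    simp only [Int.toNat_natCast]
    rw [tbL1]
    rw [st2 _ _ hbn]
    try simp [Nat.xor_assoc]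
  · -- flags 0101, inversion mask 10
    refine PySem.List.foldl_congr_mem _ _ _ _ ?_
    intro acc b hb
    rw [PySem.List.mem_pyRange_one] at hb
    obtain ⟨bn, rfl⟩ : ∃ bn : Nat, b = (bn : Int) := ⟨b.toNat, (Int.toNat_of_nonneg hb.1).symm⟩
    have hbn : bn < 16 := by exact_mod_cast hb.2
    refine if_congr ?_ rfl rfl
    rw [guard_eq]
    simp only [Int.toNat_natCast]
    rw [tbL1]
    rw [st4 _ _ hbn]
    have hx0 : bn ^^^ 8 < 16 := xlt16 hbn (by norm_num)
    rw [st2 _ _ hx0]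
    try simp [Nat.xor_assoc]
  · -- flags 0110, inversion mask 6
    refine PySem.List.foldl_congr_mem _ _ _ _ ?_
    intro acc b hb
    rw [PySem.List.mem_pyRange_one] at hb
    obtain ⟨bn, rfl⟩ : ∃ bn : Nat, b = (bn : Int) := ⟨b.toNat, (Int.toNat_of_nonneg hb.1).symm⟩
    have hbn : bn < 16 := by exact_mod_cast hb.2
    refine if_congr ?_ rfl rfl
    rw [guard_eq]
    simp only [Int.toNat_natCast]
    rw [tbL1]
    rw [st3 _ _ hbn]
    have hx0 : bn ^^^ 4 < 16 := xlt16 hbn (by norm_num)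
    rw [st2 _ _ hx0]
    try simp [Nat.xor_assoc]
  · -- flags 0111, inversion mask 14
    refine PySem.List.foldl_congr_mem _ _ _ _ ?_
    intro acc b hb
    rw [PySem.List.mem_pyRange_one] at hb
    obtain ⟨bn, rfl⟩ : ∃ bn : Nat, b = (bn : Int) := ⟨b.toNat, (Int.toNat_of_nonneg hb.1).symm⟩
    have hbn : bn < 16 := by exact_mod_cast hb.2
    refine if_congr ?_ rfl rfl
    rw [guard_eq]
    simp only [Int.toNat_natCast]
    rw [tbL1]
    rw [st4 _ _ hbn]
    have hx0 : bn ^^^ 8 < 16 := xlt16 hbn (by norm_num)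
    rw [st3 _ _ hx0]
    have hx1 : (bn ^^^ 8) ^^^ 4 < 16 := xlt16 hx0 (by norm_num)
    rw [st2 _ _ hx1]
    try simp [Nat.xor_assoc]
  · -- flags 1000, inversion mask 1
    refine PySem.List.foldl_congr_mem _ _ _ _ ?_
    intro acc b hb
    rw [PySem.List.mem_pyRange_one] at hb
    obtain ⟨bn, rfl⟩ : ∃ bn : Nat, b = (bn : Int) := ⟨b.toNat, (Int.toNat_of_nonneg hb.1).symm⟩
    have hbn : bn < 16 := by exact_mod_cast hb.2
    refine if_congr ?_ rfl rfl
    rw [guard_eq]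
    simp only [Int.toNat_natCast]
    rw [tbL1]
    rw [st1 _ _ hbn]
    try simp [Nat.xor_assoc]
  · -- flags 1001, inversion mask 9
    refine PySem.List.foldl_congr_mem _ _ _ _ ?_
    intro acc b hb
    rw [PySem.List.mem_pyRange_one] at hb
    obtain ⟨bn, rfl⟩ : ∃ bn : Nat, b = (bn : Int) := ⟨b.toNat, (Int.toNat_of_nonneg hb.1).symm⟩
    have hbn : bn < 16 := by exact_mod_cast hb.2
    refine if_congr ?_ rfl rfl
    rw [guard_eq]
    simp only [Int.toNat_natCast]
    rw [tbL1]
    rw [st4 _ _ hbn]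
    have hx0 : bn ^^^ 8 < 16 := xlt16 hbn (by norm_num)
    rw [st1 _ _ hx0]
    try simp [Nat.xor_assoc]
  · -- flags 1010, inversion mask 5
    refine PySem.List.foldl_congr_mem _ _ _ _ ?_
    intro acc b hb
    rw [PySem.List.mem_pyRange_one] at hb
    obtain ⟨bn, rfl⟩ : ∃ bn : Nat, b = (bn : Int) := ⟨b.toNat, (Int.toNat_of_nonneg hb.1).symm⟩
    have hbn : bn < 16 := by exact_mod_cast hb.2
    refine if_congr ?_ rfl rfl
    rw [guard_eq]
    simp only [Int.toNat_natCast]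
    rw [tbL1]
    rw [st3 _ _ hbn]
    have hx0 : bn ^^^ 4 < 16 := xlt16 hbn (by norm_num)
    rw [st1 _ _ hx0]
    try simp [Nat.xor_assoc]
  · -- flags 1011, inversion mask 13
    refine PySem.List.foldl_congr_mem _ _ _ _ ?_
    intro acc b hb
    rw [PySem.List.mem_pyRange_one] at hb
    obtain ⟨bn, rfl⟩ : ∃ bn : Nat, b = (bn : Int) := ⟨b.toNat, (Int.toNat_of_nonneg hb.1).symm⟩
    have hbn : bn < 16 := by exact_mod_cast hb.2
    refine if_congr ?_ rfl rfl
    rw [guard_eq]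
    simp only [Int.toNat_natCast]
    rw [tbL1]
    rw [st4 _ _ hbn]
    have hx0 : bn ^^^ 8 < 16 := xlt16 hbn (by norm_num)
    rw [st3 _ _ hx0]
    have hx1 : (bn ^^^ 8) ^^^ 4 < 16 := xlt16 hx0 (by norm_num)
    rw [st1 _ _ hx1]
    try simp [Nat.xor_assoc]
  · -- flags 1100, inversion mask 3
    refine PySem.List.foldl_congr_mem _ _ _ _ ?_
    intro acc b hb
    rw [PySem.List.mem_pyRange_one] at hb
    obtain ⟨bn, rfl⟩ : ∃ bn : Nat, b = (bn : Int) := ⟨b.toNat, (Int.toNat_of_nonneg hb.1).symm⟩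
    have hbn : bn < 16 := by exact_mod_cast hb.2
    refine if_congr ?_ rfl rfl
    rw [guard_eq]
    simp only [Int.toNat_natCast]
    rw [tbL1]
    rw [st2 _ _ hbn]
    have hx0 : bn ^^^ 2 < 16 := xlt16 hbn (by norm_num)
    rw [st1 _ _ hx0]
    try simp [Nat.xor_assoc]
  · -- flags 1101, inversion mask 11
    refine PySem.List.foldl_congr_mem _ _ _ _ ?_
    intro acc b hb
    rw [PySem.List.mem_pyRange_one] at hb
    obtain ⟨bn, rfl⟩ : ∃ bn : Nat, b = (bn : Int) := ⟨b.toNat, (Int.toNat_of_nonneg hb.1).symm⟩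
    have hbn : bn < 16 := by exact_mod_cast hb.2
    refine if_congr ?_ rfl rfl
    rw [guard_eq]
    simp only [Int.toNat_natCast]
    rw [tbL1]
    rw [st4 _ _ hbn]
    have hx0 : bn ^^^ 8 < 16 := xlt16 hbn (by norm_num)
    rw [st2 _ _ hx0]
    have hx1 : (bn ^^^ 8) ^^^ 2 < 16 := xlt16 hx0 (by norm_num)
    rw [st1 _ _ hx1]
    try simp [Nat.xor_assoc]
  · -- flags 1110, inversion mask 7
    refine PySem.List.foldl_congr_mem _ _ _ _ ?_
    intro acc b hb
    rw [PySem.List.mem_pyRange_one] at hb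
    obtain ⟨bn, rfl⟩ : ∃ bn : Nat, b = (bn : Int) := ⟨b.toNat, (Int.toNat_of_nonneg hb.1).symm⟩
    have hbn : bn < 16 := by exact_mod_cast hb.2
    refine if_congr ?_ rfl rfl
    rw [guard_eq]
    simp only [Int.toNat_natCast]
    rw [tbL1]
    rw [st3 _ _ hbn]
    have hx0 : bn ^^^ 4 < 16 := xlt16 hbn (by norm_num)
    rw [st2 _ _ hx0]
    have hx1 : (bn ^^^ 4) ^^^ 2 < 16 := xlt16 hx0 (by norm_num)
    rw [st1 _ _ hx1]
    try simp [Nat.xor_assoc]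
  · -- flags 1111, inversion mask 15
    refine PySem.List.foldl_congr_mem _ _ _ _ ?_
    intro acc b hb
    rw [PySem.List.mem_pyRange_one] at hb
    obtain ⟨bn, rfl⟩ : ∃ bn : Nat, b = (bn : Int) := ⟨b.toNat, (Int.toNat_of_nonneg hb.1).symm⟩
    have hbn : bn < 16 := by exact_mod_cast hb.2
    refine if_congr ?_ rfl rfl
    rw [guard_eq]
    simp only [Int.toNat_natCast]
    rw [tbL1]
    rw [st4 _ _ hbn]
    have hx0 : bn ^^^ 8 < 16 := xlt16 hbn (by norm_num)
    rw [st3 _ _ hx0]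
    have hx1 : (bn ^^^ 8) ^^^ 4 < 16 := xlt16 hx0 (by norm_num)
    rw [st2 _ _ hx1]
    have hx2 : ((bn ^^^ 8) ^^^ 4) ^^^ 2 < 16 := xlt16 hx1 (by norm_num)
    rw [st1 _ _ hx2]
    try simp [Nat.xor_assoc]

lemma xform_true (tv : Int) (iinv_list : List Bool) (iperm_list : List Int) :
    xform tv true iinv_list iperm_list
      = xform (PySem.Int.band (Int.not tv) 65535) false iinv_list iperm_list := rfl

lemma xform_alt_true (tv : Int) (iinv_list : List Bool) (iperm_list : List Int) :
    xform_alt tv true iinv_list iperm_list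
      = xform_alt (PySem.Int.band (Int.not tv) 65535) false iinv_list iperm_list := rfl

-- ===== VERDICT (by name: the statement is the Claim_ definition above) =====
theorem xform_spec : Claim_equal_xform := by
  unfold Claim_equal_xform Spec_xform
  intro tv oinv iinv_list iperm_list _ _
  cases oinv with
  | false => exact core tv iinv_list iperm_list
  | true => rw [xform_true, xform_alt_true]; exact core _ iinv_list iperm_list
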